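-- pv_equiv track=rewrite | github.com/marijnkoolen/fuzzy-search | fuzzy_search/fuzzy_keyword_searcher.py | score_ngram_overlap
-- ===== SOURCE A (Python) =====
-- def make_ngrams(term, n):
--     term = "#{t}#".format(t=term)
--     max_start = len(term) - n + 1
--     return [term[start:start + n] for start in range(0, max_start)]
--
-- def score_ngram_overlap(term1, term2, ngram_size):
--     term1_ngrams = make_ngrams(term1, ngram_size)
--     term2_ngrams = make_ngrams(term2, ngram_size)
--     overlap = 0
--     for ngram in term1_ngrams:
--         if ngram in term2_ngrams:
--             term2_ngrams.pop(term2_ngrams.index(ngram))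
--             overlap += 1
--     return overlap
-- ===== SOURCE B (Python) =====
-- def make_ngrams(term, n):
--     term = "#{t}#".format(t=term)
--     max_start = len(term) - n + 1
--     return [term[start:start + n] for start in range(0, max_start)]
--
-- def score_ngram_overlap(term1, term2, ngram_size):
--     ngrams1 = sorted(make_ngrams(term1, ngram_size))
--     ngrams2 = sorted(make_ngrams(term2, ngram_size))
--     i = 0
--     j = 0
--     overlap = 0
--     while i < len(ngrams1) and j < len(ngrams2):
--         if ngrams1[i] == ngrams2[j]:
--             overlap += 1
--             i += 1
--             j += 1
--         elif ngrams1[i] < ngrams2[j]: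
--             i += 1
--         else:
--             j += 1
--     return overlap
-- ===== Notes on version B (the rewrite author's own statement) =====
-- stated objective: alternative
-- what changed: Replaced A's per-ngram membership scan with pop(index(...)) deletion by sorting both n-gram lists and counting the multiset intersection with a single two-pointer merge pass.
import Mathlib
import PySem

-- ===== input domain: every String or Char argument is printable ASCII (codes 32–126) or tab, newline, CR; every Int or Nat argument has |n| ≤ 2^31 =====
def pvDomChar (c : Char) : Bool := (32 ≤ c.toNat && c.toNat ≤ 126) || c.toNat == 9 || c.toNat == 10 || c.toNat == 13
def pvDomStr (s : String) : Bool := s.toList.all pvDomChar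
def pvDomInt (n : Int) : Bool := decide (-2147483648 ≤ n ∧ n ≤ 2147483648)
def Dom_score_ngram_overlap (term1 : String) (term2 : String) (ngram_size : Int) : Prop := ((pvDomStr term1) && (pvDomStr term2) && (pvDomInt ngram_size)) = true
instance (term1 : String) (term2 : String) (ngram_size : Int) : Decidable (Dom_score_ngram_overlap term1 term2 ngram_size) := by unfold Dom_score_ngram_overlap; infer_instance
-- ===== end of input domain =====

-- B replaces A's per-ngram membership scan with erase (quadratic) by sort-both-lists
-- plus a two-pointer merge that counts the multiset intersection; objective: alternative algorithm.


-- ===== PORT A =====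
-- make_ngrams: term = "#" + term + "#"; [term[start:start+n] for start in range(0, len(term)-n+1)]
def makeNgrams (term : String) (n : Int) : List String :=
  let t : List Char := '#' :: term.toList ++ ['#']
  let maxStart : Int := (t.length : Int) - n + 1
  (PySem.List.pyRange 0 maxStart 1).map
    (fun start => String.ofList (PySem.List.slice t (some start) (some (start + n))))

-- one iteration of A's loop: if ngram in l: l.pop(l.index(ngram)); overlap += 1
def stepA (st : List String × Int) (g : String) : List String × Int :=
  if g ∈ st.1 then
    match PySem.List.index? st.1 g with
    | some i =>
      match PySem.List.pop? st.1 (i : Int) with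
      | some (_, rest) => (rest, st.2 + 1)
      | none => (st.1, st.2 + 1)   -- unreachable: index? returns a valid index
    | none => (st.1, st.2 + 1)     -- unreachable: g ∈ st.1
  else st

def score_ngram_overlap (term1 : String) (term2 : String) (ngram_size : Int) : Int :=
  let term1_ngrams := makeNgrams term1 ngram_size
  let term2_ngrams := makeNgrams term2 ngram_size
  (term1_ngrams.foldl stepA (term2_ngrams, 0)).2

-- ===== PORT B =====
-- two-pointer walk over the two sorted lists (Source B's while loop, as structural recursion)
def mergeCount : List String → List String → Int
  | x :: xs, y :: ys =>
    if x = y then 1 + mergeCount xs ys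
    else if x < y then mergeCount xs (y :: ys)
    else mergeCount (x :: xs) ys
  | _, _ => 0
termination_by l1 l2 => l1.length + l2.length
decreasing_by all_goals (simp only [List.length_cons]; omega)

def score_ngram_overlap_alt (term1 : String) (term2 : String) (ngram_size : Int) : Int :=
  let ngrams1 := PySem.List.sorted (makeNgrams term1 ngram_size) (fun x => x) false
  let ngrams2 := PySem.List.sorted (makeNgrams term2 ngram_size) (fun x => x) false
  mergeCount ngrams1 ngrams2

-- ===== PRECONDITION & SPEC =====
def Spec_score_ngram_overlap (term1 : String) (term2 : String) (ngram_size : Int) (out : Int) : Prop := out = score_ngram_overlap_alt term1 term2 ngram_size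
instance (term1 : String) (term2 : String) (ngram_size : Int) (out : Int) : Decidable (Spec_score_ngram_overlap term1 term2 ngram_size out) := by unfold Spec_score_ngram_overlap; infer_instance

-- ===== CLAIM (what is proved, stated in full; the proofs are below) =====
def Claim_equal_score_ngram_overlap : Prop := ∀ (term1 : String) (term2 : String) (ngram_size : Int), Dom_score_ngram_overlap term1 term2 ngram_size → Spec_score_ngram_overlap term1 term2 ngram_size (score_ngram_overlap term1 term2 ngram_size)

-- ===== LEMMAS AND PROOFS =====
-- A's step removes the first occurrence of g (pop at index = erase) when g is present.
theorem stepA_eq (l : List String) (acc : Int) (g : String) :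
    stepA (l, acc) g = if g ∈ l then (l.erase g, acc + 1) else (l, acc) := by
  unfold stepA
  by_cases h : g ∈ l
  · simp only [h, if_pos]
    rcases Option.isSome_iff_exists.1 ((PySem.List.index?_isSome_iff l g).2 h) with ⟨k, hk⟩
    rw [hk]
    dsimp only
    rcases (PySem.List.index?_eq_some_iff l g k).1 hk with ⟨pre, suf, hxs, hlen, hnp⟩
    have hklt : k < l.length := by
      subst hxs; simp [← hlen]
    rw [PySem.List.pop?_natCast l k hklt]
    subst hxs hlen
    have : (pre ++ g :: suf).eraseIdx pre.length = pre ++ suf := by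
      clear hk hnp hklt h
      induction pre with
      | nil => rfl
      | cons p ps ih => simpa using ih
    rw [this]
    have : (pre ++ g :: suf).erase g = pre ++ suf := by
      rw [List.erase_append_right _ hnp]; simp
    rw [this]
  · simp [h]

-- A's loop computes the multiset-intersection cardinality.
theorem foldA_card : ∀ (l1 l2 : List String) (acc : Int),
    (l1.foldl stepA (l2, acc)).2 = acc + (((l1 : Multiset String) ∩ (l2 : Multiset String)).card : Int) := by
  intro l1
  induction l1 with
  | nil => intro l2 acc; simp
  | cons x xs ih =>
    intro l2 acc
    simp only [List.foldl_cons, stepA_eq]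
    by_cases h : x ∈ l2
    · rw [if_pos h, ih]
      have hcc : ((x :: xs : List String) : Multiset String) ∩ (l2 : Multiset String)
           = x ::ₘ ((xs : Multiset String) ∩ ((l2 : Multiset String).erase x)) := by
        rw [← Multiset.cons_coe]; exact Multiset.cons_inter_of_pos _ (Multiset.mem_coe.2 h)
      rw [hcc, Multiset.card_cons, ← Multiset.coe_erase]
      push_cast; ring
    · rw [if_neg h, ih]
      have hcc : ((x :: xs : List String) : Multiset String) ∩ (l2 : Multiset String)
           = (xs : Multiset String) ∩ (l2 : Multiset String) := by
        rw [← Multiset.cons_coe]; exact Multiset.cons_inter_of_neg _ (Multiset.mem_coe.not.2 h)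
      rw [hcc]

-- the merge over two '≤'-sorted lists computes the same cardinality.
theorem mergeCount_card : ∀ (l1 l2 : List String),
    l1.Pairwise (· ≤ ·) → l2.Pairwise (· ≤ ·) →
    mergeCount l1 l2 = (((l1 : Multiset String) ∩ (l2 : Multiset String)).card : Int) := by
  intro l1 l2 h1 h2
  fun_induction mergeCount l1 l2 with
  | case1 xs y ys ih =>
    rw [List.pairwise_cons] at h1 h2
    rw [ih h1.2 h2.2]
    have : ((y :: xs : List String) : Multiset String) ∩ ((y :: ys : List String) : Multiset String)
         = y ::ₘ ((xs : Multiset String) ∩ (ys : Multiset String)) := by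
      rw [← Multiset.cons_coe, ← Multiset.cons_coe,
          Multiset.cons_inter_of_pos _ (Multiset.mem_cons_self y _), Multiset.erase_cons_head]
    rw [this, Multiset.card_cons]; push_cast; ring
  | case2 x xs y ys hne hlt ih =>
    rw [ih (List.pairwise_cons.1 h1).2 h2]
    have hx : x ∉ (y :: ys : List String) := by
      intro hm
      rcases List.mem_cons.1 hm with rfl | hm
      · exact absurd rfl hne
      · exact absurd hlt (not_lt.2 ((List.pairwise_cons.1 h2).1 _ hm))
    have : ((x :: xs : List String) : Multiset String) ∩ ((y :: ys : List String) : Multiset String)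
         = (xs : Multiset String) ∩ ((y :: ys : List String) : Multiset String) := by
      rw [← Multiset.cons_coe]; exact Multiset.cons_inter_of_neg _ (Multiset.mem_coe.not.2 hx)
    rw [this]
  | case3 x xs y ys hne hge ih =>
    rw [ih h1 (List.pairwise_cons.1 h2).2]
    have hyx : y < x := lt_of_le_of_ne (not_lt.1 hge) (fun h => hne h.symm)
    have hy : y ∉ (x :: xs : List String) := by
      intro hm
      rcases List.mem_cons.1 hm with rfl | hm
      · exact absurd rfl (ne_of_lt hyx)
      · exact absurd ((List.pairwise_cons.1 h1).1 _ hm) (not_le.2 hyx)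
    have : ((x :: xs : List String) : Multiset String) ∩ ((y :: ys : List String) : Multiset String)
         = ((x :: xs : List String) : Multiset String) ∩ ((ys : List String) : Multiset String) := by
      rw [Multiset.inter_comm, ← Multiset.cons_coe,
          Multiset.cons_inter_of_neg _ (Multiset.mem_coe.not.2 hy), Multiset.inter_comm]
    rw [this]
  | case4 l1 l2 h =>
    cases l1 with
    | nil => simp
    | cons x xs =>
      cases l2 with
      | nil => simp
      | cons y ys => exact (h x xs y ys rfl rfl).elim

-- ===== VERDICT (by name: the statement is the Claim_ definition above) =====
theorem score_ngram_overlap_spec : Claim_equal_score_ngram_overlap := by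
  intro term1 term2 ngram_size _
  unfold Spec_score_ngram_overlap score_ngram_overlap score_ngram_overlap_alt
  set l1 := makeNgrams term1 ngram_size
  set l2 := makeNgrams term2 ngram_size
  have hp1 := PySem.List.sorted_perm l1 (fun x => x) false
  have hp2 := PySem.List.sorted_perm l2 (fun x => x) false
  have hs1 : (PySem.List.sorted l1 (fun x => x) false).Pairwise (· ≤ ·) := by
    simpa using PySem.List.sorted_pairwise l1 (fun x => x)
  have hs2 : (PySem.List.sorted l2 (fun x => x) false).Pairwise (· ≤ ·) := by
    simpa using PySem.List.sorted_pairwise l2 (fun x => x)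
  rw [foldA_card, mergeCount_card _ _ hs1 hs2,
      Multiset.coe_eq_coe.2 hp1, Multiset.coe_eq_coe.2 hp2]
  simp
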